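-- pv_equiv track=rewrite | github.com/ResultManagersWouter/sleutels_gisib_bgt | exclude_guids.py | pick_guid_col
-- ===== SOURCE A (Python) =====
-- GUID_NAMES = {"guid"}  # extend if you use variants (e.g., 'globalid')
--
-- def pick_guid_col(cols):
--     cols = [str(c) for c in cols]
--     # exact first
--     for c in cols:
--         if c.strip().lower() in GUID_NAMES:
--             return c
--     # then contains 'guid'
--     for c in cols:
--         if "guid" in c.lower():
--             return c
--     return None
-- ===== SOURCE B (Python) =====
-- GUID_NAMES = {"guid"}  # extend if you use variants (e.g., 'globalid')
--
-- def pick_guid_col(cols):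
--     # single pass: exact match returns immediately; first contains-match is remembered
--     candidate = None
--     for c in map(str, cols):
--         if c.strip().lower() in GUID_NAMES:
--             return c
--         if candidate is None and "guid" in c.lower():
--             candidate = c
--     return candidate
-- ===== Notes on version B (the rewrite author's own statement) =====
-- stated objective: alternative
-- what changed: Replaces A's two sequential scans (exact match, then contains-match) with one single pass that returns an exact match immediately and remembers only the first contains-match as a candidate.
import Mathlib
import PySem

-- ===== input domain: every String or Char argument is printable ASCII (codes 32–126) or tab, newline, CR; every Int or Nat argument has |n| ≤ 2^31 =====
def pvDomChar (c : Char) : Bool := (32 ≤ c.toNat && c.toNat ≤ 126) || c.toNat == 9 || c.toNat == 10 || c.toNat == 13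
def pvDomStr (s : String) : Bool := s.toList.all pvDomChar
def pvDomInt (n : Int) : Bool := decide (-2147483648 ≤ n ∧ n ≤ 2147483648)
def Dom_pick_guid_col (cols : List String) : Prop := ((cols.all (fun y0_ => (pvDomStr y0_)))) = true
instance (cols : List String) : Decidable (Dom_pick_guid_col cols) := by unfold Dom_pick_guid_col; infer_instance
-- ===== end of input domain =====

-- B: one single pass (exact match returns at once, first contains-match is remembered) instead of A's two scans.
-- ===== PORT A =====
def GUID_NAMES : PySem.Set String := ["guid"]

-- first loop of A: return the first c with c.strip().lower() in GUID_NAMES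
def pickExactLoop : List String → Option String
  | [] => none
  | c :: rest =>
    if PySem.Set.contains GUID_NAMES (PySem.Str.lower (PySem.Str.strip c)) then some c
    else pickExactLoop rest

-- second loop of A: return the first c with "guid" in c.lower()
def pickContainsLoop : List String → Option String
  | [] => none
  | c :: rest =>
    if PySem.Str.isIn "guid" (PySem.Str.lower c) then some c
    else pickContainsLoop rest

def pick_guid_col (cols : List String) : Option String :=
  match pickExactLoop cols with
  | some c => some c
  | none => pickContainsLoop cols

-- ===== PORT B =====
-- B's single loop carrying the candidate (first contains-match seen so far)
def pickLoopB : List String → Option String → Option String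
  | [], candidate => candidate
  | c :: rest, candidate =>
    if PySem.Set.contains GUID_NAMES (PySem.Str.lower (PySem.Str.strip c)) then some c
    else pickLoopB rest
      (if candidate.isNone && PySem.Str.isIn "guid" (PySem.Str.lower c) then some c else candidate)

def pick_guid_col_alt (cols : List String) : Option String :=
  pickLoopB cols none

-- ===== PRECONDITION & SPEC =====
def Spec_pick_guid_col (cols : List String) (out : Option String) : Prop := out = pick_guid_col_alt cols
instance (cols : List String) (out : Option String) : Decidable (Spec_pick_guid_col cols out) := by unfold Spec_pick_guid_col; infer_instance

-- ===== CLAIM (what is proved, stated in full; the proofs are below) =====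
def Claim_equal_pick_guid_col : Prop := ∀ (cols : List String), Dom_pick_guid_col cols → Spec_pick_guid_col cols (pick_guid_col cols)

-- ===== LEMMAS AND PROOFS =====

-- loop invariant: B's single pass equals "exact result, else candidate, else contains result"
theorem pickLoopB_eq (cols : List String) : ∀ (cand : Option String),
    pickLoopB cols cand =
      match pickExactLoop cols with
      | some c => some c
      | none => match cand with
                | some x => some x
                | none => pickContainsLoop cols := by
  induction cols with
  | nil => intro cand; cases cand <;> rfl
  | cons c rest ih =>
    intro cand
    by_cases hx : PySem.Str.lower (PySem.Str.strip c) ∈ GUID_NAMES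
    · simp [pickLoopB, pickExactLoop, hx]
    · have h1 : pickLoopB (c :: rest) cand =
          pickLoopB rest
            (if cand.isNone && PySem.Str.isIn "guid" (PySem.Str.lower c) then some c else cand) := by
        simp [pickLoopB, hx]
      have h2 : pickExactLoop (c :: rest) = pickExactLoop rest := by
        simp [pickExactLoop, hx]
      have h3 : pickContainsLoop (c :: rest) =
          if PySem.Str.isIn "guid" (PySem.Str.lower c) then some c else pickContainsLoop rest := by
        rfl
      rw [h1, ih, h2, h3]
      cases cand with
      | some x => rfl
      | none =>
        by_cases hc : PySem.Str.isIn "guid" (PySem.Str.lower c) = true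
        · rw [if_pos hc]
          simp only [Option.isNone_none, Bool.true_and, hc, if_true]
        · rw [if_neg hc]
          have hb : ((none : Option String).isNone && PySem.Str.isIn "guid" (PySem.Str.lower c)) ≠ true := by
            simp [Bool.not_eq_true] at hc ⊢
            exact hc
          rw [if_neg hb]

-- ===== VERDICT =====
theorem pick_guid_col_spec : Claim_equal_pick_guid_col := by
  intro cols _
  unfold Spec_pick_guid_col pick_guid_col pick_guid_col_alt
  rw [pickLoopB_eq]
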